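-- pv_equiv track=rewrite | github.com/zugebot/Jerrinth-Bot | cogs/cog_math.py | insert_zero
-- ===== SOURCE A (Python) =====
-- def insert_zero(string):
--     """for use of ,solve"""
--     if "." not in string:
--         return string
--     result = ""
--     for i in range(len(string)):
--         if string[i] == "." and not string[i - 1].isdigit():
--             result += "0" + string[i]
--         elif i == 0 and string[i] == ".":
--             result += "0" + string[i]
--         else:
--             result += string[i]
--
--     return result
-- ===== SOURCE B (Python) =====
-- def insert_zero(string):
--     """for use of ,solve"""
--     parts = string.split(".")
--     pieces = [parts[0]]
--     for prev, part in zip(parts, parts[1:]):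
--         pieces.append("." if prev[-1:].isdigit() else "0.")
--         pieces.append(part)
--     return "".join(pieces)
-- ===== Notes on version B (the rewrite author's own statement) =====
-- stated objective: alternative
-- what changed: B splits the string at the dots and rejoins the parts, choosing per boundary whether to prefix a zero from the last character of the preceding part, instead of A's index loop with a wraparound lookback at string[i-1] and a membership pre-check.
import Mathlib
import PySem

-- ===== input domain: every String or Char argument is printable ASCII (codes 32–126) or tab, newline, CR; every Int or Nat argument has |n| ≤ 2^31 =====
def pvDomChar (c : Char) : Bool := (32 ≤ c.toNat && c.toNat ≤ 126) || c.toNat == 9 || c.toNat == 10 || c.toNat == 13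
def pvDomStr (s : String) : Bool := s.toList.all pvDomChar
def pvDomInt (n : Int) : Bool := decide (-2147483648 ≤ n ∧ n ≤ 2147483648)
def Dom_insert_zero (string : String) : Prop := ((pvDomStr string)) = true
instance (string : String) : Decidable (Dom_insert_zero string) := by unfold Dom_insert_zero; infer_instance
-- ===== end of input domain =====

-- B rebuilds the string from its '.'-split parts (joiner chosen per boundary) instead of A's
-- per-index character scan with wraparound lookback; objective: alternative (same linear cost).

-- ===== PORT A =====
def insert_zero (string : String) : String :=
  if ¬ (PySem.Str.isIn "." string) then string
  else
    let cs := string.toList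
    let result := (PySem.List.pyRange 0 (cs.length : Int) 1).foldl (fun acc i =>
      let ci := PySem.List.pyGetD cs i ' '
      if ci = '.' ∧ ¬ (PySem.Chars.strIsdigit [PySem.List.pyGetD cs (i - 1) ' '] = true) then
        acc ++ ['0', ci]
      else if i = 0 ∧ ci = '.' then
        acc ++ ['0', ci]
      else acc ++ [ci]) []
    String.ofList result

-- ===== PORT B =====
def insert_zero_alt (string : String) : String :=
  let parts := PySem.Chars.splitOn string.toList ['.']
  let pieces := (parts.zip parts.tail).foldl (fun acc pq =>
      (acc ++ [if PySem.Chars.strIsdigit (PySem.List.slice pq.1 (some (-1)) none) = true then ['.'] else ['0', '.']]) ++ [pq.2])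
    [PySem.List.pyGetD parts 0 []]
  String.ofList (PySem.Chars.join [] pieces)

-- ===== PRECONDITION & SPEC =====
def Spec_insert_zero (string : String) (out : String) : Prop := out = insert_zero_alt string
instance (string : String) (out : String) : Decidable (Spec_insert_zero string out) := by unfold Spec_insert_zero; infer_instance

-- ===== CLAIM (what is proved, stated in full; the proofs are below) =====
def Claim_equal_insert_zero : Prop := ∀ (string : String), Dom_insert_zero string → Spec_insert_zero string (insert_zero string)

-- ===== LEMMAS AND PROOFS =====

-- the common value both programs compute: scan with a "previous char was a digit" flag
def pvSpec : Bool → List Char → List Char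
  | _, [] => []
  | pd, c :: r => (if c = '.' ∧ pd = false then ['0', c] else [c]) ++ pvSpec (PySem.Chars.isdigit c) r

-- structural version of split-on-'.': (first part, remaining parts)
def pvSplit : List Char → List Char × List (List Char)
  | [] => ([], [])
  | c :: r => if c = '.' then ([], (pvSplit r).1 :: (pvSplit r).2)
              else (c :: (pvSplit r).1, (pvSplit r).2)

-- "last char of p is a digit", with default pd for empty p
def pvLastD (pd : Bool) (p : List Char) : Bool :=
  match p.getLast? with
  | some c => PySem.Chars.isdigit c
  | none => pd

-- the joiner+part tail of B's rebuild
def pvSeps : Bool → List (List Char) → List Char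
  | _, [] => []
  | b, q :: qs => (if b then ['.'] else ['0', '.']) ++ q ++ pvSeps (pvLastD false q) qs

-- per-index contribution of A's loop
def pvG (cs : List Char) (i : Int) : List Char :=
  let ci := PySem.List.pyGetD cs i ' '
  if ci = '.' ∧ ¬ (PySem.Chars.strIsdigit [PySem.List.pyGetD cs (i - 1) ' '] = true) then ['0', ci]
  else if i = 0 ∧ ci = '.' then ['0', ci]
  else [ci]

lemma pvGo_eq (fuel : Nat) : ∀ (l cur : List Char) (acc : List (List Char)), l.length < fuel →
    PySem.Chars.splitOn.go ['.'] fuel l cur acc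
      = acc.reverse ++ (cur.reverse ++ (pvSplit l).1) :: (pvSplit l).2 := by
  induction fuel with
  | zero => intro l cur acc h; omega
  | succ f ih =>
    intro l cur acc h
    cases l with
    | nil => simp [PySem.Chars.splitOn.go, pvSplit]
    | cons c rest =>
      by_cases hc : c = '.'
      · subst hc
        rw [PySem.Chars.splitOn.go]
        simp only [List.length_cons, List.length_nil, List.drop_succ_cons, List.drop_zero]
        rw [ih rest [] _ (by simpa using Nat.lt_of_succ_lt_succ h)]
        simp [pvSplit]
      · rw [PySem.Chars.splitOn.go]
        have : (['.'].isPrefixOf (c :: rest)) = false := by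
          simp [List.isPrefixOf]; exact fun hx => (hc hx.symm).elim
        rw [this]
        simp only [Bool.false_eq_true, if_false]
        rw [ih rest (c :: cur) acc (by simpa using Nat.lt_of_succ_lt_succ h)]
        simp [pvSplit, hc]

lemma pvSplitOn_eq (cs : List Char) :
    PySem.Chars.splitOn cs ['.'] = (pvSplit cs).1 :: (pvSplit cs).2 := by
  unfold PySem.Chars.splitOn
  rw [pvGo_eq (cs.length + 1) cs [] [] (by omega)]
  simp

lemma pvLastD_cons (pd : Bool) (c : Char) (p : List Char) :
    pvLastD pd (c :: p) = pvLastD (PySem.Chars.isdigit c) p := by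
  cases p with
  | nil => simp [pvLastD]
  | cons d q =>
    obtain ⟨x, hx⟩ : ∃ x, (d :: q).getLast? = some x :=
      ⟨_, List.getLast?_eq_some_getLast (by simp)⟩
    simp [pvLastD, List.getLast?_cons_cons, hx]

lemma pvSpec_eq_split (cs : List Char) : ∀ pd,
    pvSpec pd cs = (pvSplit cs).1 ++ pvSeps (pvLastD pd (pvSplit cs).1) (pvSplit cs).2 := by
  induction cs with
  | nil => intro pd; simp [pvSpec, pvSplit, pvSeps]
  | cons c r ih =>
    intro pd
    by_cases hc : c = '.'
    · subst hc
      have hd : PySem.Chars.isdigit '.' = false := by decide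
      simp only [pvSpec, pvSplit, hd]
      rw [ih false]
      cases pd <;> simp [pvSeps, pvLastD]
    · simp only [pvSpec, pvSplit, if_neg hc]
      rw [ih (PySem.Chars.isdigit c), pvLastD_cons]
      simp [hc]

lemma pvDropLast (l : List Char) (h : l ≠ []) : List.drop (l.length - 1) l = [l.getLast h] := by
  induction l with
  | nil => simp at h
  | cons c q ih =>
    cases q with
    | nil => simp
    | cons d r =>
      have := ih (by simp)
      simpa [List.getLast] using this

lemma pvSepFor_eq (p : List Char) :
    (if PySem.Chars.strIsdigit (PySem.List.slice p (some (-1)) none) = true then (['.'] : List Char) else ['0', '.'])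
      = (if pvLastD false p then ['.'] else ['0', '.']) := by
  rw [PySem.List.slice_from_neg_one]
  cases p with
  | nil => simp [pvLastD]; decide
  | cons c q =>
    have hne : c :: q ≠ [] := by simp
    have h1 : List.drop ((c :: q).length - 1) (c :: q) = [(c :: q).getLast hne] := pvDropLast (c :: q) hne
    rw [h1]
    have h2 : pvLastD false (c :: q) = PySem.Chars.isdigit ((c :: q).getLast hne) := by
      simp [pvLastD, List.getLast?_eq_some_getLast]
    rw [h2]
    congr 1
    simp [PySem.Chars.strIsdigit]

lemma pvJoinNil (ps : List (List Char)) : PySem.Chars.join [] ps = ps.flatten := by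
  induction ps with
  | nil => simp [PySem.Chars.join, List.intercalate]
  | cons p q ih =>
    cases q with
    | nil => simp [PySem.Chars.join, List.intercalate]
    | cons a b =>
      rw [PySem.Chars.join_cons_cons]
      simpa using ih

lemma pvFlattenPairs (f : List Char × List Char → List Char) :
    ∀ l : List (List Char × List Char),
    (l.flatMap (fun pq => [f pq] ++ [pq.2])).flatten = l.flatMap (fun pq => f pq ++ pq.2) := by
  intro l
  induction l with
  | nil => simp
  | cons a t ih => simp only [List.flatMap_cons, List.flatten_append, ih]; simp

lemma pvZip_eq (ps : List (List Char)) : ∀ p,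
    (List.zip (p :: ps) ps).flatMap
        (fun pq => (if PySem.Chars.strIsdigit (PySem.List.slice pq.1 (some (-1)) none) = true then ['.'] else ['0', '.']) ++ pq.2)
      = pvSeps (pvLastD false p) ps := by
  induction ps with
  | nil => intro p; simp [pvSeps]
  | cons q qs ih =>
    intro p
    simp only [List.zip_cons_cons, List.flatMap_cons, ih q]
    rw [pvSepFor_eq]
    simp [pvSeps]

lemma pvB_eq (string : String) :
    insert_zero_alt string = String.ofList (pvSpec false string.toList) := by
  unfold insert_zero_alt
  dsimp only
  rw [pvSplitOn_eq]
  have hbody : (fun (acc : List (List Char)) (pq : List Char × List Char) =>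
      (acc ++ [if PySem.Chars.strIsdigit (PySem.List.slice pq.1 (some (-1)) none) = true then ['.'] else ['0', '.']]) ++ [pq.2])
      = (fun acc pq => acc ++ ([if PySem.Chars.strIsdigit (PySem.List.slice pq.1 (some (-1)) none) = true then ['.'] else ['0', '.']] ++ [pq.2])) := by
    funext acc pq; simp
  rw [hbody, PySem.List.foldl_append_eq_flatMap]
  rw [pvJoinNil]
  simp only [List.tail_cons, PySem.List.pyGetD_zero_cons]
  rw [pvSpec_eq_split string.toList false]
  congr 1
  rw [List.flatten_append, pvFlattenPairs]
  simp only [List.flatten_cons, List.flatten_nil, List.append_nil]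
  rw [pvZip_eq]

lemma pvStrIsdigit_one (c : Char) : PySem.Chars.strIsdigit [c] = PySem.Chars.isdigit c := by
  simp [PySem.Chars.strIsdigit]

lemma pvSpec_no_dot (cs : List Char) : ∀ pd, '.' ∉ cs → pvSpec pd cs = cs := by
  induction cs with
  | nil => intro pd _; rfl
  | cons c r ih =>
    intro pd h
    have hc : c ≠ '.' := fun e => h (e ▸ List.mem_cons_self)
    simp [pvSpec, hc, ih _ (fun m => h (List.mem_cons_of_mem _ m))]

lemma pvA_rest (cs : List Char) : ∀ (m k : Nat), cs.length - k = m → 1 ≤ k → k ≤ cs.length →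
    ((PySem.List.pyRange (k : Int) (cs.length : Int) 1).flatMap (pvG cs))
      = pvSpec (PySem.Chars.isdigit (cs.getD (k - 1) ' ')) (cs.drop k) := by
  intro m
  induction m with
  | zero =>
    intro k hm h1 h2
    have hk : k = cs.length := by omega
    subst hk
    have : PySem.List.pyRange (cs.length : Int) (cs.length : Int) 1 = [] := by
      simp [PySem.List.pyRange]
    simp [this, pvSpec]
  | succ n ih =>
    intro k hm h1 h2
    have hlt : k < cs.length := by omega
    rw [PySem.List.pyRange_one_cons (by exact_mod_cast hlt)]
    simp only [List.flatMap_cons]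
    have hcast : ((k : Int) + 1) = ((k + 1 : Nat) : Int) := by push_cast; ring
    rw [hcast, ih (k + 1) (by omega) (by omega) (by omega)]
    have hg : pvG cs k = (if cs.getD k ' ' = '.' ∧ (PySem.Chars.isdigit (cs.getD (k-1) ' ')) = false
        then ['0', cs.getD k ' '] else [cs.getD k ' ']) := by
      unfold pvG
      have e1 : PySem.List.pyGetD cs (k : Int) ' ' = cs.getD k ' ' := by
        simp [PySem.List.pyGetD_natCast]
      have e2 : PySem.List.pyGetD cs ((k : Int) - 1) ' ' = cs.getD (k - 1) ' ' := by
        have : ((k : Int) - 1) = ((k - 1 : Nat) : Int) := by omega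
        rw [this]; simp [PySem.List.pyGetD_natCast]
      have e3 : ¬ ((k : Int) = 0) := by omega
      rw [e1, e2, pvStrIsdigit_one]
      simp only [e3, false_and, if_false]
      cases PySem.Chars.isdigit (cs.getD (k-1) ' ') <;> simp
    rw [hg]
    have hdrop : cs.drop k = cs.getD k ' ' :: cs.drop (k + 1) := by
      rw [List.getD_eq_getElem _ _ hlt]
      exact List.drop_eq_getElem_cons hlt
    rw [hdrop]
    have hnext : cs.getD ((k+1) - 1) ' ' = cs.getD k ' ' := by simp
    rw [hnext]
    rfl

lemma pvA_flat (cs : List Char) (h : cs ≠ []) :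
    ((PySem.List.pyRange 0 (cs.length : Int) 1).flatMap (pvG cs)) = pvSpec false cs := by
  have hlen : 1 ≤ cs.length := by have := List.length_pos_of_ne_nil h; omega
  rw [PySem.List.pyRange_one_cons (by exact_mod_cast hlen)]
  simp only [List.flatMap_cons]
  have hcast : ((0 : Int) + 1) = ((1 : Nat) : Int) := by norm_num
  rw [hcast, pvA_rest cs (cs.length - 1) 1 rfl (by omega) hlen]
  have hg0 : pvG cs 0 = (if cs.getD 0 ' ' = '.' then ['0', cs.getD 0 ' '] else [cs.getD 0 ' ']) := by
    unfold pvG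
    have e1 : PySem.List.pyGetD cs (0 : Int) ' ' = cs.getD 0 ' ' := by
      simp [PySem.List.pyGetD_zero]
    rw [e1]
    by_cases hd : cs.getD 0 ' ' = '.'
    · simp only [hd]
      split_ifs with h1 h2 <;> simp_all
    · have hd' : cs[0]?.getD ' ' ≠ '.' := by simpa [List.getD] using hd
      simp [hd']
  rw [hg0]
  cases cs with
  | nil => simp at h
  | cons c r =>
    have hdrop : (c :: r).drop 1 = r := by simp
    rw [hdrop]
    have hgd : (c :: r).getD 0 ' ' = c := rfl
    rw [hgd]
    show _ = (if c = '.' ∧ false = false then ['0', c] else [c]) ++ pvSpec (PySem.Chars.isdigit c) r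
    simp

lemma pvA_eq (string : String) :
    insert_zero string = String.ofList (pvSpec false string.toList) := by
  unfold insert_zero
  by_cases hin : PySem.Str.isIn "." string = true
  · rw [if_neg (by simp [PySem.Str.isIn] at hin ⊢; simp [hin])]
    dsimp only
    have hinf : ['.'] <:+: string.toList := by
      have := (PySem.Str.isIn_iff_infix (sub := ".") (s := string)).mp hin
      simpa using this
    have hne : string.toList ≠ [] := by
      intro e
      rw [e] at hinf
      have := hinf.length_le
      simp at this
    have hbody : (fun (acc : List Char) (i : Int) =>
        let ci := PySem.List.pyGetD string.toList i ' '
        if ci = '.' ∧ ¬ (PySem.Chars.strIsdigit [PySem.List.pyGetD string.toList (i - 1) ' '] = true) then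
          acc ++ ['0', ci]
        else if i = 0 ∧ ci = '.' then
          acc ++ ['0', ci]
        else acc ++ [ci]) = (fun acc i => acc ++ pvG string.toList i) := by
      funext acc i
      simp only [pvG]
      split_ifs <;> rfl
    rw [hbody, PySem.List.foldl_append_eq_flatMap, pvA_flat _ hne]
    rfl
  · rw [if_pos (by simpa using hin)]
    have hnd : '.' ∉ string.toList := by
      intro hm
      apply hin
      rw [PySem.Str.isIn_iff_infix]
      obtain ⟨s, t, he⟩ := List.append_of_mem hm
      exact ⟨s, t, by rw [he]; simp⟩
    rw [pvSpec_no_dot _ _ hnd]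
    exact (String.ofList_toList (s := string)).symm

-- ===== VERDICT (by name: the statement is the Claim_ definition above) =====
theorem insert_zero_spec : Claim_equal_insert_zero := by
  intro string _
  unfold Spec_insert_zero
  rw [pvA_eq, pvB_eq]
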